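-- pv_equiv track=rewrite | github.com/poype/Algorithm | find_redundant_connection.py | find_last_edge
-- ===== SOURCE A (Python) =====
-- from typing import List, Set
--
-- def find_last_edge(trace: List, edges: List[List[int]]):
--     max_pos = -1
--     result = [0, 0]
--     for i in range(len(trace)):
--         if i == len(trace) - 1:  # 最后一个节点能跟第一个节点组成边
--             trace_edge = [trace[i], trace[0]]
--         else:
--             trace_edge = trace[i:i + 2]
--         trace_edge.sort()
--         for j in range(len(edges)):
--             if trace_edge[0] == edges[j][0] and trace_edge[1] == edges[j][1] and j > max_pos:
--                 max_pos = j
--                 result[0] = trace_edge[0]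
--                 result[1] = trace_edge[1]
--
--     return result
-- ===== SOURCE B (Python) =====
-- def find_last_edge(trace, edges):
--     n = len(trace)
--     targets = {tuple(sorted((trace[i], trace[(i + 1) % n])))
--                for i in range(n)}
--     for j in range(len(edges) - 1, -1, -1):
--         if tuple(edges[j][:2]) in targets:
--             return list(edges[j][:2])
--     return [0, 0]
-- ===== Notes on version B (the rewrite author's own statement) =====
-- stated objective: faster
-- what changed: B precomputes the set of sorted consecutive trace edges once and scans edges backwards with an early exit, instead of A's nested rescan of all edges for every trace edge with a running max index.
-- outside the precondition, e.g. on find_last_edge([1, 2], [[3]]): A returns [0, 0], B returns [0, 0]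
import Mathlib
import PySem

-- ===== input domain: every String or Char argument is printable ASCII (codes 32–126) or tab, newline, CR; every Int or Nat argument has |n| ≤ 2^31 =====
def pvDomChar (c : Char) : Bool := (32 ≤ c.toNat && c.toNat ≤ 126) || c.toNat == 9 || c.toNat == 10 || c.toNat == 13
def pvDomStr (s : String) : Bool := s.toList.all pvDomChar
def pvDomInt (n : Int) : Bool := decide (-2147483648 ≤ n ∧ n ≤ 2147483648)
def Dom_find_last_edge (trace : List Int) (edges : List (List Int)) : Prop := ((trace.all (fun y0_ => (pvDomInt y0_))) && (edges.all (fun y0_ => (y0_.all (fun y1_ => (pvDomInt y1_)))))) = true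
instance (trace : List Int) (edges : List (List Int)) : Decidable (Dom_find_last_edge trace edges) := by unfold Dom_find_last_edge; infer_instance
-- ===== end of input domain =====

-- B builds the set of sorted trace edges once and scans edges backwards with early exit, replacing A's nested rescan: faster (asymptotic).


-- ===== PORT A =====
def find_last_edge (trace : List Int) (edges : List (List Int)) : List Int :=
  let fin := (PySem.List.pyRange 0 (trace.length : Int) 1).foldl (fun (st : Int × List Int) i =>
    let te0 :=
      if i = (trace.length : Int) - 1 then
        [PySem.List.pyGetD trace i 0, PySem.List.pyGetD trace 0 0]
      else
        PySem.List.slice trace (some i) (some (i + 2))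
    let trace_edge := PySem.List.sorted te0 (fun x => x) false
    (PySem.List.pyRange 0 (edges.length : Int) 1).foldl (fun (st2 : Int × List Int) j =>
      if PySem.List.pyGetD trace_edge 0 0 = PySem.List.pyGetD (PySem.List.pyGetD edges j []) 0 0
          ∧ PySem.List.pyGetD trace_edge 1 0 = PySem.List.pyGetD (PySem.List.pyGetD edges j []) 1 0
          ∧ j > st2.1
      then (j, [PySem.List.pyGetD trace_edge 0 0, PySem.List.pyGetD trace_edge 1 0])
      else st2) st) ((-1 : Int), ([0, 0] : List Int))
  fin.2

-- ===== PORT B =====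
def altTargets (trace : List Int) : PySem.Set (List Int) :=
  PySem.Set.ofList ((PySem.List.pyRange 0 (trace.length : Int) 1).map (fun i =>
    PySem.List.sorted
      [PySem.List.pyGetD trace i 0,
       PySem.List.pyGetD trace (PySem.Int.mod (i + 1) (trace.length : Int)) 0]
      (fun x => x) false))

def altScan (targets : PySem.Set (List Int)) (edges : List (List Int)) : Nat → List Int
  | 0 => [0, 0]
  | k + 1 =>
    let e2 := PySem.List.slice (PySem.List.pyGetD edges (k : Int) []) none (some 2)
    if PySem.Set.contains targets e2 then e2 else altScan targets edges k

def find_last_edge_alt (trace : List Int) (edges : List (List Int)) : List Int :=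
  altScan (altTargets trace) edges edges.length

-- ===== PRECONDITION & SPEC =====
-- Pre_ excludes nonempty traces paired with an edge entry of length < 2: there A's edges[j][0]/edges[j][1]
-- indexing can raise IndexError; for a closed form it also excludes short entries whose first element never
-- matches (A then returns [0, 0], as does B — see the cite in claim.json).
def Pre_find_last_edge (trace : List Int) (edges : List (List Int)) : Prop :=
  trace = [] ∨ ∀ e ∈ edges, 2 ≤ e.length
instance (trace : List Int) (edges : List (List Int)) : Decidable (Pre_find_last_edge trace edges) := by
  unfold Pre_find_last_edge; infer_instance

def pvWitness_find_last_edge : List Int × List (List Int) :=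
  ([1, 2, 3], [[1, 2], [2, 3], [1, 3]])

def Spec_find_last_edge (trace : List Int) (edges : List (List Int)) (out : List Int) : Prop := out = find_last_edge_alt trace edges
instance (trace : List Int) (edges : List (List Int)) (out : List Int) : Decidable (Spec_find_last_edge trace edges out) := by unfold Spec_find_last_edge; infer_instance

-- ===== CLAIM (what is proved, stated in full; the proofs are below) =====
def Claim_equal_find_last_edge : Prop := ∀ (trace : List Int) (edges : List (List Int)), Dom_find_last_edge trace edges → Pre_find_last_edge trace edges → Spec_find_last_edge trace edges (find_last_edge trace edges)

-- ===== LEMMAS AND PROOFS =====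

def lastFilter (n : Nat) (P : Nat → Bool) : Option Nat := ((List.range n).filter P).getLast?
theorem lastFilter_succ (n : Nat) (P : Nat → Bool) :
    lastFilter (n + 1) P = if P n then some n else lastFilter n P := by
  unfold lastFilter
  rw [List.range_succ, List.filter_append]
  by_cases h : P n <;> simp [h, List.getLast?_append]
theorem lastFilter_some (n : Nat) (P : Nat → Bool) {j : Nat} (h : lastFilter n P = some j) :
    j < n ∧ P j = true ∧ ∀ k, j < k → k < n → ¬ P k = true := by
  induction n with
  | zero => simp [lastFilter] at h
  | succ n ih =>
    rw [lastFilter_succ] at h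
    by_cases hp : P n = true
    · simp [hp] at h
      subst h
      exact ⟨Nat.lt_succ_self _, hp, fun k hk1 hk2 => by omega⟩
    · simp [hp] at h
      obtain ⟨h1, h2, h3⟩ := ih h
      refine ⟨by omega, h2, fun k hk1 hk2 => ?_⟩
      rcases Nat.lt_succ_iff_lt_or_eq.mp hk2 with h' | h'
      · exact h3 k hk1 h'
      · subst h'; exact hp

theorem inner_char (E : List (List Int)) (hE : ∀ e ∈ E, 2 ≤ e.length)
    (te : List Int) (a b : Int) (hte : te = [a, b]) :
    ∀ (N : Nat), N ≤ E.length → ∀ (m : Int) (r : List Int),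
    ((PySem.List.pyRange 0 (N : Int) 1).foldl (fun (st2 : Int × List Int) j =>
        if PySem.List.pyGetD te 0 0 = PySem.List.pyGetD (PySem.List.pyGetD E j []) 0 0
            ∧ PySem.List.pyGetD te 1 0 = PySem.List.pyGetD (PySem.List.pyGetD E j []) 1 0
            ∧ j > st2.1
        then (j, [PySem.List.pyGetD te 0 0, PySem.List.pyGetD te 1 0])
        else st2) (m, r))
    = match lastFilter N (fun j => decide ((PySem.List.pyGetD E (j : Int) []).take 2 = te ∧ m < (j : Int))) with
      | some j => ((j : Int), te)
      | none => (m, r) := by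
  intro N
  induction N with
  | zero =>
    intro _ m r
    simp [lastFilter, PySem.List.pyRange_one_eq_nil (by norm_num : (0:Int) ≤ 0)]
  | succ N ih =>
    intro hN m r
    have hN' : N ≤ E.length := by omega
    have hcast : ((N + 1 : Nat) : Int) = (N : Int) + 1 := by push_cast; ring
    rw [hcast, PySem.List.pyRange_one_succ_right (by positivity), List.foldl_append, ih hN' m r,
      lastFilter_succ]
    have hNlt : N < E.length := by omega
    obtain ⟨e, he⟩ : ∃ e, PySem.List.pyGetD E (N : Int) [] = e := ⟨_, rfl⟩
    have heE : e ∈ E := by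
      rw [PySem.List.pyGetD_natCast] at he
      rw [← he]
      simp [List.getD, hNlt]
    have hel : 2 ≤ e.length := hE e heE
    obtain ⟨e0, e1, rest, hee⟩ : ∃ e0 e1 rest, e = e0 :: e1 :: rest := by
      match e, hel with
      | e0 :: e1 :: rest, _ => exact ⟨e0, e1, rest, rfl⟩
    have htake : (PySem.List.pyGetD E (N : Int) []).take 2 = [e0, e1] := by rw [he, hee]; rfl
    have hte0 : PySem.List.pyGetD te 0 0 = a := by rw [hte]; rfl
    have hte1 : PySem.List.pyGetD te 1 0 = b := by rw [hte]; rfl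
    have he0 : PySem.List.pyGetD (PySem.List.pyGetD E ((N : Nat) : Int) []) 0 0 = e0 := by
      rw [he, hee]; simp [pysem]
    have he1 : PySem.List.pyGetD (PySem.List.pyGetD E ((N : Nat) : Int) []) 1 0 = e1 := by
      rw [he, hee]; simp [pysem]
    have hiff : ∀ m' : Int, ((decide ((PySem.List.pyGetD E ((N : Nat) : Int) []).take 2 = te ∧ m' < ((N : Nat) : Int))) = true)
        ↔ (a = e0 ∧ b = e1 ∧ ((N : Nat) : Int) > m') := by
      intro m'
      rw [decide_eq_true_eq, htake, hte]
      constructor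
      · rintro ⟨h12, h3⟩
        simp only [List.cons.injEq, and_true] at h12
        exact ⟨h12.1.symm, h12.2.symm, by omega⟩
      · rintro ⟨h1, h2, h3⟩
        exact ⟨by simp [h1, h2], by omega⟩
    cases h : lastFilter N (fun j => decide ((PySem.List.pyGetD E (j : Int) []).take 2 = te ∧ m < (j : Int))) with
    | none =>
      simp only [List.foldl_cons, List.foldl_nil, hte0, hte1, he0, he1]
      by_cases hc : a = e0 ∧ b = e1 ∧ ((N : Nat) : Int) > m
      · rw [if_pos hc, if_pos ((hiff m).mpr hc)]
        simp [hte]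
      · rw [if_neg hc, if_neg (fun hx => hc ((hiff m).mp hx))]
    | some j =>
      obtain ⟨hj1, hj2', hj3⟩ := lastFilter_some _ _ h
      simp only [decide_eq_true_eq] at hj2'
      obtain ⟨hj2, hjm⟩ := hj2'
      simp only [List.foldl_cons, List.foldl_nil, hte0, hte1, he0, he1]
      have hjN : ((j : Nat) : Int) < ((N : Nat) : Int) := by exact_mod_cast hj1
      by_cases hc : a = e0 ∧ b = e1
      · rw [if_pos ⟨hc.1, hc.2, hjN⟩, if_pos ((hiff m).mpr ⟨hc.1, hc.2, by omega⟩)]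
        simp [hte]
      · rw [if_neg (fun hx => hc ⟨hx.1, hx.2.1⟩),
          if_neg (fun hx => hc ⟨((hiff m).mp hx).1, ((hiff m).mp hx).2.1⟩)]

theorem lastFilter_none_iff (n : Nat) (P : Nat → Bool) :
    lastFilter n P = none ↔ ∀ j < n, ¬ P j = true := by
  unfold lastFilter
  rw [List.getLast?_eq_none_iff, List.filter_eq_nil_iff]
  simp

theorem lastFilter_eq_some (n : Nat) (P : Nat → Bool) {j : Nat}
    (h1 : j < n) (h2 : P j = true) (h3 : ∀ k, j < k → k < n → ¬ P k = true) :
    lastFilter n P = some j := by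
  induction n with
  | zero => omega
  | succ n ih =>
    rw [lastFilter_succ]
    by_cases hj : j = n
    · subst hj; simp [h2]
    · have hpn : ¬ P n = true := h3 n (by omega) (by omega)
      simp only [hpn, Bool.false_eq_true, if_false]
      exact ih (by omega) (fun k hk1 hk2 => h3 k hk1 (by omega))

theorem lastFilter_congr (n : Nat) (P Q : Nat → Bool) (h : ∀ j < n, P j = Q j) :
    lastFilter n P = lastFilter n Q := by
  unfold lastFilter
  rw [List.filter_congr (fun j hj => h j (List.mem_range.mp hj))]

theorem outer_char (E : List (List Int)) (hE : ∀ e ∈ E, 2 ≤ e.length) :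
    ∀ (TEs : List (List Int)), (∀ te ∈ TEs, ∃ a b, te = [a, b]) →
    ∀ (m : Int) (r : List Int),
    (TEs.foldl (fun (st : Int × List Int) te =>
      (PySem.List.pyRange 0 (E.length : Int) 1).foldl (fun (st2 : Int × List Int) j =>
        if PySem.List.pyGetD te 0 0 = PySem.List.pyGetD (PySem.List.pyGetD E j []) 0 0
            ∧ PySem.List.pyGetD te 1 0 = PySem.List.pyGetD (PySem.List.pyGetD E j []) 1 0
            ∧ j > st2.1
        then (j, [PySem.List.pyGetD te 0 0, PySem.List.pyGetD te 1 0])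
        else st2) st) (m, r))
    = match lastFilter E.length (fun j => decide ((PySem.List.pyGetD E (j : Int) []).take 2 ∈ TEs ∧ m < (j : Int))) with
      | some j => ((j : Int), (PySem.List.pyGetD E (j : Int) []).take 2)
      | none => (m, r) := by
  intro TEs
  induction TEs with
  | nil =>
    intro _ m r
    have : lastFilter E.length (fun j => decide ((PySem.List.pyGetD E (j : Int) []).take 2 ∈ ([] : List (List Int)) ∧ m < (j : Int))) = none := by
      rw [lastFilter_none_iff]; intro j _; simp
    rw [this]
    simp
  | cons te rest ih =>
    intro hsh m r
    obtain ⟨a, b, hte⟩ := hsh te (List.mem_cons_self)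
    have hrest : ∀ x ∈ rest, ∃ a b, x = [a, b] := fun x hx => hsh x (List.mem_cons_of_mem _ hx)
    rw [List.foldl_cons, inner_char E hE te a b hte E.length le_rfl m r]
    cases h1 : lastFilter E.length (fun j => decide ((PySem.List.pyGetD E (j : Int) []).take 2 = te ∧ m < (j : Int))) with
    | none =>
      rw [ih hrest m r]
      have hcong := lastFilter_congr E.length
        (fun j => decide ((PySem.List.pyGetD E (j : Int) []).take 2 ∈ rest ∧ m < (j : Int)))
        (fun j => decide ((PySem.List.pyGetD E (j : Int) []).take 2 ∈ te :: rest ∧ m < (j : Int)))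
        (by
          intro j hj
          have hno := (lastFilter_none_iff _ _).mp h1 j hj
          simp only [decide_eq_true_eq, not_and] at hno
          apply decide_eq_decide.mpr
          constructor
          · rintro ⟨hmem, hm⟩; exact ⟨List.mem_cons_of_mem _ hmem, hm⟩
          · rintro ⟨hmem, hm⟩
            rcases List.mem_cons.mp hmem with hh | hh
            · exact (hno hh hm).elim
            · exact ⟨hh, hm⟩)
      rw [← hcong]
    | some j1 =>
      obtain ⟨hj1n, hj1p, hj1max⟩ := lastFilter_some _ _ h1
      simp only [decide_eq_true_eq] at hj1p
      obtain ⟨hj1te, hj1m⟩ := hj1p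
      rw [ih hrest ((j1 : Nat) : Int) te]
      cases h2 : lastFilter E.length (fun j => decide ((PySem.List.pyGetD E (j : Int) []).take 2 ∈ rest ∧ ((j1 : Nat) : Int) < (j : Int))) with
      | none =>
        have : lastFilter E.length (fun j => decide ((PySem.List.pyGetD E (j : Int) []).take 2 ∈ te :: rest ∧ m < (j : Int))) = some j1 := by
          apply lastFilter_eq_some _ _ hj1n
          · simp only [decide_eq_true_eq]
            exact ⟨by rw [hj1te]; exact List.mem_cons_self, hj1m⟩
          · intro k hk1 hk2
            simp only [decide_eq_true_eq, not_and]
            intro hmem hm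
            rcases List.mem_cons.mp hmem with hh | hh
            · exact (lastFilter_some _ _ h1).2.2 k hk1 hk2 (by simp only [decide_eq_true_eq]; exact ⟨hh, hm⟩)
            · exact (lastFilter_none_iff _ _).mp h2 k hk2
                (by simp only [decide_eq_true_eq]; exact ⟨hh, by exact_mod_cast Nat.cast_lt.mpr hk1⟩)
        rw [this]
        exact congrArg (Prod.mk ((j1 : Nat) : Int)) hj1te.symm
      | some j2 =>
        obtain ⟨hj2n, hj2p, hj2max⟩ := lastFilter_some _ _ h2
        simp only [decide_eq_true_eq] at hj2p
        obtain ⟨hj2mem, hj2gt⟩ := hj2p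
        have hj1j2 : j1 < j2 := by exact_mod_cast hj2gt
        have : lastFilter E.length (fun j => decide ((PySem.List.pyGetD E (j : Int) []).take 2 ∈ te :: rest ∧ m < (j : Int))) = some j2 := by
          apply lastFilter_eq_some _ _ hj2n
          · simp only [decide_eq_true_eq]
            exact ⟨List.mem_cons_of_mem _ hj2mem, by omega⟩
          · intro k hk1 hk2
            simp only [decide_eq_true_eq, not_and]
            intro hmem hm
            rcases List.mem_cons.mp hmem with hh | hh
            · exact hj1max k (by omega) hk2 (by simp only [decide_eq_true_eq]; exact ⟨hh, hm⟩)
            · exact hj2max k hk1 hk2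
                (by simp only [decide_eq_true_eq]; exact ⟨hh, by exact_mod_cast Nat.cast_lt.mpr (by omega : j1 < k)⟩)
        rw [this]

theorem altScan_char (t : PySem.Set (List Int)) (E : List (List Int)) (k : Nat) :
    altScan t E k =
      match lastFilter k (fun j => PySem.Set.contains t ((PySem.List.pyGetD E (j : Int) []).take 2)) with
      | some j => (PySem.List.pyGetD E (j : Int) []).take 2
      | none => [0, 0] := by
  induction k with
  | zero => simp [altScan, lastFilter]
  | succ k ih =>
    rw [lastFilter_succ]
    by_cases h : List.take 2 (E[k]?.getD []) ∈ t
    · simp [altScan, PySem.List.slice_to _ (by norm_num : (0:Int) ≤ 2), show (2:Int).toNat = 2 from rfl, h]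
    · simp only [altScan, PySem.List.slice_to _ (by norm_num : (0:Int) ≤ 2), show (2:Int).toNat = 2 from rfl]
      rw [ih]
      simp [h]

theorem altScan_empty (E : List (List Int)) (k : Nat) :
    altScan ([] : PySem.Set (List Int)) E k = [0, 0] := by
  induction k with
  | zero => rfl
  | succ k ih => simpa [altScan] using ih

theorem te_eq (trace : List Int) (i : Int) (h0 : 0 ≤ i) (h1 : i < (trace.length : Int)) :
    PySem.List.sorted (if i = (trace.length : Int) - 1
        then [PySem.List.pyGetD trace i 0, PySem.List.pyGetD trace 0 0]
        else PySem.List.slice trace (some i) (some (i + 2))) (fun x => x) false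
    = PySem.List.sorted [PySem.List.pyGetD trace i 0,
        PySem.List.pyGetD trace (PySem.Int.mod (i + 1) (trace.length : Int)) 0] (fun x => x) false := by
  have hpos : (0 : Int) < (trace.length : Int) := by omega
  lift i to Nat using h0 with k
  by_cases hk : (k : Int) = (trace.length : Int) - 1
  · rw [if_pos hk]
    have hmod : PySem.Int.mod ((k : Int) + 1) (trace.length : Int) = 0 := by
      rw [PySem.Int.mod_eq_emod_of_pos hpos, show (k : Int) + 1 = (trace.length : Int) by omega]
      simp
    rw [hmod]
  · rw [if_neg hk]
    have hk2 : (k : Int) + 1 < (trace.length : Int) := by omega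
    have hklen : k + 1 < trace.length := by exact_mod_cast hk2
    have hmod : PySem.Int.mod ((k : Int) + 1) (trace.length : Int) = (k : Int) + 1 := by
      rw [PySem.Int.mod_eq_emod_of_pos hpos]
      exact Int.emod_eq_of_lt (by positivity) hk2
    have hsl : PySem.List.slice trace (some (k : Int)) (some ((k : Int) + 2))
        = [trace.getD k 0, trace.getD (k + 1) 0] := by
      rw [show ((k : Int) + 2) = ((k : Int) + ((2 : Nat) : Int)) by norm_num,
        PySem.List.slice_natCast_add]
      apply List.ext_getElem
      · simp; omega
      · intro i h1' h2'
        simp only [List.getElem_take, List.getElem_drop]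
        simp at h2'
        interval_cases i <;>
          simp [List.getD_eq_getElem?_getD, hklen, Nat.lt_of_succ_lt hklen]
    have hg1 : PySem.List.pyGetD trace (k : Int) 0 = trace.getD k 0 := PySem.List.pyGetD_natCast _ _ _
    have hg2 : PySem.List.pyGetD trace ((k : Int) + 1) 0 = trace.getD (k + 1) 0 := by
      rw [show ((k : Int) + 1) = (((k + 1 : Nat)) : Int) by push_cast; ring]
      exact PySem.List.pyGetD_natCast _ _ _
    rw [hmod, hsl, hg1, hg2]

theorem find_last_edge_eq (trace : List Int) (edges : List (List Int))
    (hE : ∀ e ∈ edges, 2 ≤ e.length) :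
    find_last_edge trace edges = find_last_edge_alt trace edges := by
  have hshape : ∀ te ∈ (PySem.List.pyRange 0 (trace.length : Int) 1).map (fun i =>
      PySem.List.sorted [PySem.List.pyGetD trace i 0,
        PySem.List.pyGetD trace (PySem.Int.mod (i + 1) (trace.length : Int)) 0] (fun x => x) false),
      ∃ a b, te = [a, b] := by
    intro te hte
    obtain ⟨i, _, hi⟩ := List.mem_map.mp hte
    have hlen : te.length = 2 := by
      rw [← hi]
      simp [PySem.List.length_sorted]
    exact List.length_eq_two.mp hlen
  have hA : find_last_edge trace edges =
      (((PySem.List.pyRange 0 (trace.length : Int) 1).map (fun i =>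
        PySem.List.sorted [PySem.List.pyGetD trace i 0,
          PySem.List.pyGetD trace (PySem.Int.mod (i + 1) (trace.length : Int)) 0] (fun x => x) false)).foldl
        (fun (st : Int × List Int) te =>
        (PySem.List.pyRange 0 (edges.length : Int) 1).foldl (fun (st2 : Int × List Int) j =>
          if PySem.List.pyGetD te 0 0 = PySem.List.pyGetD (PySem.List.pyGetD edges j []) 0 0
              ∧ PySem.List.pyGetD te 1 0 = PySem.List.pyGetD (PySem.List.pyGetD edges j []) 1 0
              ∧ j > st2.1
          then (j, [PySem.List.pyGetD te 0 0, PySem.List.pyGetD te 1 0])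
          else st2) st) ((-1 : Int), ([0, 0] : List Int))).2 := by
    simp only [find_last_edge]
    rw [List.foldl_map]
    congr 1
    apply PySem.List.foldl_congr_mem
    intro acc i hi
    obtain ⟨h0, h1⟩ := (PySem.List.mem_pyRange_one).mp hi
    rw [te_eq trace i h0 h1]
  rw [hA, outer_char edges hE _ hshape (-1) [0, 0]]
  unfold find_last_edge_alt
  rw [altScan_char]
  rw [← lastFilter_congr edges.length
    (fun j => decide ((PySem.List.pyGetD edges (j : Int) []).take 2 ∈
        (PySem.List.pyRange 0 (trace.length : Int) 1).map (fun i =>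
          PySem.List.sorted [PySem.List.pyGetD trace i 0,
            PySem.List.pyGetD trace (PySem.Int.mod (i + 1) (trace.length : Int)) 0] (fun x => x) false) ∧ (-1 : Int) < (j : Int)))
    (fun j => PySem.Set.contains (altTargets trace) ((PySem.List.pyGetD edges (j : Int) []).take 2))
    (by
      intro j _
      rw [Bool.eq_iff_iff, decide_eq_true_eq]
      constructor
      · rintro ⟨hm, _⟩
        exact (PySem.Set.contains_iff _ _).mpr ((PySem.Set.mem_ofList _ _).mpr hm)
      · intro hc
        exact ⟨(PySem.Set.mem_ofList _ _).mp ((PySem.Set.contains_iff _ _).mp hc), by omega⟩)]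
  cases h : lastFilter edges.length
      (fun j => decide ((PySem.List.pyGetD edges (j : Int) []).take 2 ∈
        (PySem.List.pyRange 0 (trace.length : Int) 1).map (fun i =>
          PySem.List.sorted [PySem.List.pyGetD trace i 0,
            PySem.List.pyGetD trace (PySem.Int.mod (i + 1) (trace.length : Int)) 0] (fun x => x) false) ∧ (-1 : Int) < (j : Int))) <;> rfl

-- ===== VERDICT (by name: the statement is the Claim_ definition above) =====
theorem find_last_edge_spec : Claim_equal_find_last_edge := by
  unfold Claim_equal_find_last_edge
  intro trace edges _ hpre
  unfold Spec_find_last_edge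
  by_cases htr : trace = []
  · subst htr
    have hA : find_last_edge [] edges = [0, 0] := by
      simp only [find_last_edge]
      rw [show PySem.List.pyRange 0 ((List.length ([] : List Int)) : Int) 1 = []
        from PySem.List.pyRange_one_eq_nil (by norm_num)]
      rfl
    have hB : find_last_edge_alt [] edges = [0, 0] := by
      unfold find_last_edge_alt
      have h0 : altTargets ([] : List Int) = [] := by
        unfold altTargets
        rw [show PySem.List.pyRange 0 ((List.length ([] : List Int)) : Int) 1 = []
          from PySem.List.pyRange_one_eq_nil (by norm_num)]
        rfl
      rw [h0, altScan_empty]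
    rw [hA, hB]
  · exact find_last_edge_eq trace edges (hpre.resolve_left htr)
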